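-- pv_equiv track=rewrite | github.com/ThaiDat/Temporal-Difference-Learning-to-Play-2048 | gamedriver.py | __extract_positive_number
-- ===== SOURCE A (Python) =====
-- def __extract_positive_number(s):
--     '''
--     Helper function that extract all positive number from string (exclude negative sign and 0)
--     s: input string
--     n: maximum numbers to extract. This function will return after discover first n numbers
--     return list of numbers (len <= n)
--     '''
--     nums = list()
--     num = 0
--     for c in s:
--         if c.isdigit():
--             num = num * 10 + int(c)
--         elif num > 0:
--             nums.append(num)
--             num = 0
--     # Last append
--     if num > 0:
--         nums.append(num)
--     return nums
-- ===== SOURCE B (Python) =====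
-- def __extract_positive_number(s):
--     # Run-based re-implementation: slice maximal digit runs and convert each
--     # whole run with int(), instead of A's per-char accumulator + trailing append.
--     nums = []
--     i, L = 0, len(s)
--     while i < L:
--         if s[i].isdigit():
--             j = i
--             while j < L and s[j].isdigit():
--                 j += 1
--             n = int(s[i:j])
--             if n > 0:
--                 nums.append(n)
--             i = j
--         else:
--             i += 1
--     return nums
-- ===== Notes on version B (the rewrite author's own statement) =====
-- stated objective: alternative
-- what changed: B slices each maximal digit run and converts it with one int() call, instead of A's per-character accumulator with a separate trailing-append step.
import Mathlib
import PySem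

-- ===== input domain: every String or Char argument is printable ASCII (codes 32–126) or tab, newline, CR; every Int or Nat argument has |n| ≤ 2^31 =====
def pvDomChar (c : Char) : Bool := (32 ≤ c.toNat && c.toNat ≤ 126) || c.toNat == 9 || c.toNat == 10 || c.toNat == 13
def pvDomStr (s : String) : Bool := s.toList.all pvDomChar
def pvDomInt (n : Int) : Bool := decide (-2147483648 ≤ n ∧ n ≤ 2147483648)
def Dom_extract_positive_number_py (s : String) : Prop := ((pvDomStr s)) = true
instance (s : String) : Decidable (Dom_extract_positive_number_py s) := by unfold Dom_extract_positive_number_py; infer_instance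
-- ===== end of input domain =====

-- B extracts maximal digit runs and converts each run at once, replacing A's
-- per-char accumulator and trailing append; objective: alternative decomposition.

-- ===== PORT A =====
-- digit value of a digit char, as Python's int(c) on '0'..'9' (exact on ASCII digits)
def pvDigVal (c : Char) : Int := (c.toNat : Int) - 48

-- the loop of A: state (nums, num)
def pvGoA : List Char → List Int → Int → List Int
  | [], nums, num => if num > 0 then nums ++ [num] else nums
  | c :: cs, nums, num =>
    if c.isDigit then pvGoA cs nums (num * 10 + pvDigVal c)
    else if num > 0 then pvGoA cs (nums ++ [num]) 0
    else pvGoA cs nums 0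

def extract_positive_number_py (s : String) : List Int :=
  pvGoA s.toList [] 0

-- ===== PORT B =====
-- int(s[i:j]) on a maximal digit run, folded over its digit chars (exact on ASCII digits)
def pvRunVal (ds : List Char) : Int :=
  ds.foldl (fun a c => a * 10 + pvDigVal c) 0

-- B's outer while loop: skip non-digits; on a digit, slice the maximal run,
-- convert it, keep it if > 0, continue after the run.
def pvGoB : List Char → List Int
  | [] => []
  | c :: cs =>
    if c.isDigit then
      let n := pvRunVal (c :: cs.takeWhile Char.isDigit)
      let r := pvGoB (cs.dropWhile Char.isDigit)
      if n > 0 then n :: r else r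
    else pvGoB cs
termination_by l => l.length
decreasing_by
  · exact Nat.lt_succ_of_le (cs.length_dropWhile_le _)
  · simp

def extract_positive_number_py_alt (s : String) : List Int :=
  pvGoB s.toList

-- ===== PRECONDITION & SPEC =====
def Spec_extract_positive_number_py (s : String) (out : List Int) : Prop := out = extract_positive_number_py_alt s
instance (s : String) (out : List Int) : Decidable (Spec_extract_positive_number_py s out) := by unfold Spec_extract_positive_number_py; infer_instance

-- ===== CLAIM (what is proved, stated in full; the proofs are below) =====
def Claim_equal_extract_positive_number_py : Prop := ∀ (s : String), Dom_extract_positive_number_py s → Spec_extract_positive_number_py s (extract_positive_number_py s)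

-- ===== LEMMAS AND PROOFS =====

-- B's loop with a pending accumulator, bridging A's state to B's runs
def pvGoBp (cs : List Char) (num : Int) : List Int :=
  let n := (cs.takeWhile Char.isDigit).foldl (fun a c => a * 10 + pvDigVal c) num
  let r := pvGoB (cs.dropWhile Char.isDigit)
  if n > 0 then n :: r else r

lemma pvGoBp_zero (cs : List Char) : pvGoBp cs 0 = pvGoB cs := by
  induction cs with
  | nil => simp [pvGoBp, pvGoB]
  | cons c cs ih =>
    by_cases h : c.isDigit
    · simp [pvGoBp, pvGoB, h, pvRunVal, List.foldl]
    · simpa [pvGoBp, pvGoB, h] using ih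

lemma pvGoA_append (cs : List Char) : ∀ p q num, pvGoA cs (p ++ q) num = p ++ pvGoA cs q num := by
  induction cs with
  | nil => intro p q num; by_cases h : num > 0 <;> simp [pvGoA, h]
  | cons c cs ih =>
    intro p q num
    by_cases hd : c.isDigit
    · simp [pvGoA, hd, ih]
    · by_cases h : num > 0
      · simpa [pvGoA, hd, h, List.append_assoc] using ih p (q ++ [num]) 0
      · simp [pvGoA, hd, h, ih]

lemma pvDigVal_nonneg {c : Char} (h : c.isDigit) : 0 ≤ pvDigVal c := by
  have h48 : 48 ≤ c.toNat := by
    simp [Char.isDigit] at h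
    exact h.1
  simp only [pvDigVal]
  omega

lemma pvGoA_goBp (cs : List Char) : ∀ num, 0 ≤ num → pvGoA cs [] num = pvGoBp cs num := by
  induction cs with
  | nil =>
    intro num _
    by_cases h : num > 0 <;> simp [pvGoA, pvGoBp, pvGoB, h]
  | cons c cs ih =>
    intro num hnum
    by_cases hd : c.isDigit
    · have hd' : 0 ≤ num * 10 + pvDigVal c := by
        have := pvDigVal_nonneg hd
        nlinarith
      simp [pvGoA, pvGoBp, hd, ih _ hd', pvGoBp, List.foldl]
    · have e0 : pvGoA cs [] 0 = pvGoB cs := by rw [ih 0 le_rfl, pvGoBp_zero]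
      by_cases h : num > 0
      · have hs : pvGoA cs ([num] ++ []) 0 = [num] ++ pvGoA cs [] 0 := pvGoA_append cs [num] [] 0
        simp at hs
        simp [pvGoA, hd, h, hs, e0, pvGoBp, pvGoB]
      · simp [pvGoA, hd, h, e0, pvGoBp, pvGoB]

-- ===== VERDICT (by name: the statement is the Claim_ definition above) =====
theorem extract_positive_number_py_spec : Claim_equal_extract_positive_number_py := by
  intro s _
  unfold Spec_extract_positive_number_py extract_positive_number_py extract_positive_number_py_alt
  rw [pvGoA_goBp _ 0 le_rfl, pvGoBp_zero]
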